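-- pv_equiv track=rewrite | github.com/jeongye01/codingTestPython | 프로그래머스/Lv2/Day3/프로세스.py | solution
-- ===== SOURCE A (Python) =====
-- from collections import deque
--
-- def solution(priorities, location):
--     q = deque()
--     answer = 0
--     for i, p in enumerate(priorities):
--         q.append((p,i))
--     while q:
--         p,i=q.popleft()
--         canDo=True
--         for e in q:
--             if e[0]>p:
--                 q.append((p,i))
--                 canDo=False
--                 break
--
--         if canDo:
--             answer += 1
--             if i==location:
--                 return answer
--     return answer
-- ===== SOURCE B (Python) =====
-- from collections import deque
--
-- def solution(priorities, location):
--     # Sort priorities once (descending); the k-th printed job always has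
--     # priority desc[k], so the inner "is there a higher priority?" scan
--     # becomes a single comparison against desc[answer].
--     desc = sorted(priorities, reverse=True)
--     dq = deque(range(len(priorities)))
--     answer = 0
--     while dq:
--         i = dq.popleft()
--         if priorities[i] == desc[answer]:
--             answer += 1
--             if i == location:
--                 return answer
--         else:
--             dq.append(i)
--     return answer
-- ===== Notes on version B (the rewrite author's own statement) =====
-- stated objective: alternative
-- what changed: B sorts the priorities once in descending order and replaces A's inner rescan of the whole queue by a single comparison of the head's priority against desc[answer] (the k-th printed job always has the k-th largest priority); the queue holds only indices.
import Mathlib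
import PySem

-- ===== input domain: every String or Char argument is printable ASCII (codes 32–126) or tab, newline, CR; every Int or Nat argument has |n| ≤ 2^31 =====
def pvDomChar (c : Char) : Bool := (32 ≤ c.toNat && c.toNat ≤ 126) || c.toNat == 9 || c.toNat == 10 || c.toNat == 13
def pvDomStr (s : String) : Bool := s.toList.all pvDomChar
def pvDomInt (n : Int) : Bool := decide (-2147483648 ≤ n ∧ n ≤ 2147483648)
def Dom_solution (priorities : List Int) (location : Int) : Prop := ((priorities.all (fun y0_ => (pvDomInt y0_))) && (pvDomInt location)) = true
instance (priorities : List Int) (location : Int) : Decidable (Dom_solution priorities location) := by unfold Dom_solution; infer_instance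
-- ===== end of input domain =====

-- B replaces A's inner rescan of the queue by one comparison against a pre-sorted
-- priority list (the k-th printed job always has the k-th largest priority).

-- ===== PORT A =====
-- A's while-loop, with fuel (n*n+1 iterations always suffice: at most n prints,
-- each preceded by fewer than n rotations); the inner for/break scan is `any`.
def pvLoopA : Nat → List (Int × Int) → Int → Int → Int
  | 0, _, answer, _ => answer
  | _ + 1, [], answer, _ => answer
  | fuel + 1, (p, i) :: rest, answer, location =>
    if rest.any (fun e => p < e.1) then
      pvLoopA fuel (rest ++ [(p, i)]) answer location
    else if i = location then answer + 1
    else pvLoopA fuel rest (answer + 1) location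

def solution (priorities : List Int) (location : Int) : Int :=
  pvLoopA (priorities.length * priorities.length + 1)
    ((PySem.List.enumerate priorities 0).map (fun ip => (ip.2, ip.1))) 0 location

-- ===== PORT B =====
-- B's while-loop with the same fuel bound; indices are always in range, so
-- priorities[i] / desc[answer] are ported as pyGetD with default 0 (never used).
def pvLoopB (priorities desc : List Int) : Nat → List Int → Int → Int → Int
  | 0, _, answer, _ => answer
  | _ + 1, [], answer, _ => answer
  | fuel + 1, i :: rest, answer, location =>
    if PySem.List.pyGetD priorities i 0 = PySem.List.pyGetD desc answer 0 then
      if i = location then answer + 1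
      else pvLoopB priorities desc fuel rest (answer + 1) location
    else pvLoopB priorities desc fuel (rest ++ [i]) answer location

def solution_alt (priorities : List Int) (location : Int) : Int :=
  pvLoopB priorities (PySem.List.sorted priorities id true)
    (priorities.length * priorities.length + 1)
    (PySem.List.pyRange 0 priorities.length 1) 0 location

-- ===== PRECONDITION & SPEC =====
def Spec_solution (priorities : List Int) (location : Int) (out : Int) : Prop := out = solution_alt priorities location
instance (priorities : List Int) (location : Int) (out : Int) : Decidable (Spec_solution priorities location out) := by unfold Spec_solution; infer_instance

-- ===== CLAIM (what is proved, stated in full; the proofs are below) =====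
def Claim_equal_solution : Prop := ∀ (priorities : List Int) (location : Int), Dom_solution priorities location → Spec_solution priorities location (solution priorities location)

-- ===== LEMMAS AND PROOFS =====

-- the head of a descending-sorted list's k-th suffix bounds all its elements
lemma drop_le_head (desc : List Int) (hd : desc.Pairwise (fun a b => b ≤ a))
    (k : Nat) (hk : k < desc.length) :
    ∀ x ∈ desc.drop k, x ≤ desc[k] := by
  have hdrop : desc.drop k = desc[k] :: desc.drop (k + 1) := (List.getElem_cons_drop hk).symm
  have hp : (desc.drop k).Pairwise (fun a b => b ≤ a) :=
    hd.sublist (List.drop_sublist k desc)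
  rw [hdrop] at hp
  intro x hx
  rw [hdrop] at hx
  rcases List.mem_cons.1 hx with rfl | hx
  · exact le_refl _
  · exact List.rel_of_pairwise_cons hp hx

-- lockstep simulation of the two loops under the sorted-suffix invariant
lemma loop_eq (priorities desc : List Int) (hd : desc.Pairwise (fun a b => b ≤ a)) :
    ∀ (fuel : Nat) (dq : List Int) (k : Nat) (location : Int),
      (↑(dq.map (fun i => PySem.List.pyGetD priorities i 0)) : Multiset Int) = ↑(desc.drop k) →
      pvLoopA fuel (dq.map (fun i => (PySem.List.pyGetD priorities i 0, i))) (k : Int) location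
        = pvLoopB priorities desc fuel dq (k : Int) location := by
  intro fuel
  induction fuel with
  | zero => intro dq k location _; cases dq <;> simp [pvLoopA, pvLoopB]
  | succ fuel ih =>
    intro dq k location hm
    cases dq with
    | nil => simp [pvLoopA, pvLoopB]
    | cons i rest =>
      have hk : k < desc.length := by
        by_contra h
        rw [List.drop_eq_nil_of_le (by omega)] at hm
        simp at hm
      have hdrop : desc.drop k = desc[k] :: desc.drop (k + 1) := (List.getElem_cons_drop hk).symm
      have hgetD : PySem.List.pyGetD desc (k : Int) 0 = desc[k] := by
        simp [PySem.List.pyGetD_natCast, List.getD_eq_getElem?_getD, List.getElem?_eq_getElem hk]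
      have hmem_p : PySem.List.pyGetD priorities i 0 ∈ desc.drop k := by
        have h1 : PySem.List.pyGetD priorities i 0
            ∈ (i :: rest).map (fun j => PySem.List.pyGetD priorities j 0) := by simp
        rwa [← Multiset.mem_coe, hm, Multiset.mem_coe] at h1
      have hple : PySem.List.pyGetD priorities i 0 ≤ desc[k] :=
        drop_le_head desc hd k hk _ hmem_p
      by_cases hpd : PySem.List.pyGetD priorities i 0 = desc[k]
      · -- print branch: no strictly greater priority remains in the queue
        have hnone : ((rest.map (fun j => (PySem.List.pyGetD priorities j 0, j))).any
            (fun e => PySem.List.pyGetD priorities i 0 < e.1)) = false := by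
          rw [List.any_eq_false]
          intro e he
          simp only [List.mem_map] at he
          obtain ⟨j, hj, rfl⟩ := he
          have h2 : PySem.List.pyGetD priorities j 0
              ∈ (i :: rest).map (fun j => PySem.List.pyGetD priorities j 0) := by
            simp only [List.map_cons, List.mem_cons, List.mem_map]
            exact Or.inr ⟨j, hj, rfl⟩
          rw [← Multiset.mem_coe, hm, Multiset.mem_coe] at h2
          have h3 := drop_le_head desc hd k hk _ h2
          simp only [decide_eq_true_eq]
          omega
        have hmnext : (↑(rest.map (fun j => PySem.List.pyGetD priorities j 0)) : Multiset Int)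
            = ↑(desc.drop (k + 1)) := by
          have h1 : ((i :: rest).map (fun j => PySem.List.pyGetD priorities j 0) : Multiset Int)
              = PySem.List.pyGetD priorities i 0
                ::ₘ ↑(rest.map (fun j => PySem.List.pyGetD priorities j 0)) := by
            simp
          have h2 : (↑(desc.drop k) : Multiset Int) = desc[k] ::ₘ ↑(desc.drop (k + 1)) := by
            rw [hdrop]; rfl
          rw [h1, h2, hpd] at hm
          exact (Multiset.cons_inj_right _).1 hm
        simp only [List.map_cons, pvLoopA, pvLoopB, hnone, Bool.false_eq_true, if_false, hgetD]
        rw [if_pos hpd]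
        split
        · rfl
        · have h4 := ih rest (k + 1) location hmnext
          push_cast at h4 ⊢
          exact h4
      · -- rotate branch: a strictly greater priority is still in the queue
        have hplt : PySem.List.pyGetD priorities i 0 < desc[k] := lt_of_le_of_ne hple hpd
        have hdk_mem : desc[k] ∈ (i :: rest).map (fun j => PySem.List.pyGetD priorities j 0) := by
          have h1 : desc[k] ∈ desc.drop k := by rw [hdrop]; exact List.mem_cons_self
          rwa [← Multiset.mem_coe, ← hm, Multiset.mem_coe] at h1
        have hsome : ((rest.map (fun j => (PySem.List.pyGetD priorities j 0, j))).any
            (fun e => PySem.List.pyGetD priorities i 0 < e.1)) = true := by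
          rw [List.any_eq_true]
          simp only [List.map_cons, List.mem_cons, List.mem_map] at hdk_mem
          rcases hdk_mem with h | ⟨j, hj, hje⟩
          · exact absurd h.symm (by omega)
          · refine ⟨(PySem.List.pyGetD priorities j 0, j), List.mem_map.2 ⟨j, hj, rfl⟩, ?_⟩
            simp only [decide_eq_true_eq, hje]
            omega
        have hmnext : (↑((rest ++ [i]).map (fun j => PySem.List.pyGetD priorities j 0)) : Multiset Int)
            = ↑(desc.drop k) := by
          rw [← hm, Multiset.coe_eq_coe]
          exact (List.perm_append_singleton i rest).map _
        have h4 := ih (rest ++ [i]) k location hmnext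
        simp only [List.map_append, List.map_cons, List.map_nil] at h4
        simp only [List.map_cons, pvLoopA, pvLoopB, hsome, if_true, hgetD]
        rw [if_neg hpd]
        exact h4

-- ===== VERDICT (by name: the statement is the Claim_ definition above) =====
theorem solution_spec : Claim_equal_solution := by
  intro priorities location _
  unfold Spec_solution solution solution_alt
  have hd : (PySem.List.sorted priorities id true).Pairwise (fun a b => b ≤ a) := by
    simpa using PySem.List.sorted_pairwise_rev priorities id
  have hq : (PySem.List.enumerate priorities 0).map (fun ip => (ip.2, ip.1))
      = (PySem.List.pyRange 0 priorities.length 1).map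
          (fun i => (PySem.List.pyGetD priorities i 0, i)) := by
    rw [PySem.List.enumerate_eq_map_pyRange (d := 0)]
    simp [Function.comp]
  have hm : (↑((PySem.List.pyRange 0 priorities.length 1).map
        (fun i => PySem.List.pyGetD priorities i 0)) : Multiset Int)
      = ↑((PySem.List.sorted priorities id true).drop 0) := by
    rw [PySem.List.map_pyGetD_pyRange_zero']
    simp only [List.drop_zero]
    rw [Multiset.coe_eq_coe]
    exact (PySem.List.sorted_perm priorities id true).symm
  have h := loop_eq priorities (PySem.List.sorted priorities id true) hd
    (priorities.length * priorities.length + 1)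
    (PySem.List.pyRange 0 priorities.length 1) 0 location hm
  rw [hq]
  exact_mod_cast h
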